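-- pv_equiv track=rewrite | github.com/daily-boj/RanolP | 1043/solution.py | exclude_knowns
-- ===== SOURCE A (Python) =====
-- def exclude_knowns(parties, knowns):
--     ok_parties = []
--     update = False
--     for party_people in parties:
--         if party_people & knowns:
--             knowns |= party_people
--             update = True
--         else:
--             ok_parties.append(party_people)
--     if update:
--         return exclude_knowns(ok_parties, knowns)
--     else:
--         return ok_parties
-- ===== SOURCE B (Python) =====
-- def exclude_knowns(parties, knowns):
--     # Saturate the known set to a fixpoint, then filter once.
--     # (Unlike A, does not mutate the caller's `knowns` set.)
--     k = set(knowns)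
--     for _ in range(len(parties)):
--         before = len(k)
--         for p in parties:
--             if not k.isdisjoint(p):
--                 k |= p
--         if len(k) == before:
--             break
--     return [p for p in parties if k.isdisjoint(p)]
-- ===== Notes on version B (the rewrite author's own statement) =====
-- stated objective: alternative
-- what changed: B saturates the known set to a fixpoint in a bounded round loop over the full party list and then filters once, instead of A's recursion that rebuilds the list of surviving parties and recurses on it.
import Mathlib
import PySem

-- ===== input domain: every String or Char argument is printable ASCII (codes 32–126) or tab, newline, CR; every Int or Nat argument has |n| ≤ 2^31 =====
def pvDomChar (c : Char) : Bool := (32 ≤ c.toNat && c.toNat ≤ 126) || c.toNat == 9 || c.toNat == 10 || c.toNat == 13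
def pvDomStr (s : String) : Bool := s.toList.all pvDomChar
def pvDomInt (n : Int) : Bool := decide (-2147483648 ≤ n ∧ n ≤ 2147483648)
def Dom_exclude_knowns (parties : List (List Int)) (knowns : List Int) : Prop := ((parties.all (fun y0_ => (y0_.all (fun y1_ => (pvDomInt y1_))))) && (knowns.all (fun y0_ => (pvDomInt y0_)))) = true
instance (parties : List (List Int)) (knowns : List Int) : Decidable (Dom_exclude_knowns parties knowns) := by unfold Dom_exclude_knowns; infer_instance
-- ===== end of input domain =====

-- B saturates the known set to a fixpoint with one bounded round loop and then filters once,
-- instead of A's recursion on the list of surviving parties; return-value equivalence only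
-- (Python A mutates the caller's `knowns` set in place, B does not).

-- ===== PORT A =====
-- One pass of A's `for party_people in parties:` loop over the state
-- (ok_parties, knowns, update); structural recursion over the party list.
def pvAStep : List (List Int) → List Int → List (List Int) × List Int × Bool
  | [], knowns => ([], knowns, false)
  | party :: rest, knowns =>
      if !(PySem.Set.inter party knowns).isEmpty then
        -- `if party_people & knowns:` truthy → absorb the party, set update
        let r := pvAStep rest (PySem.Set.union knowns party)
        (r.1, r.2.1, true)
      else
        let r := pvAStep rest knowns
        (party :: r.1, r.2.1, r.2.2)

-- termination fact for A's recursion: an updating pass strictly shrinks the party list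
theorem pvAStep_len (ps : List (List Int)) (k : List Int) :
    (pvAStep ps k).1.length ≤ ps.length ∧
      ((pvAStep ps k).2.2 = true → (pvAStep ps k).1.length < ps.length) := by
  induction ps generalizing k with
  | nil => simp [pvAStep]
  | cons p rest ih =>
      cases hc : (PySem.Set.inter p k).isEmpty with
      | true =>
          have h1 := (ih k).1
          have h2 := (ih k).2
          simp only [pvAStep, hc, Bool.not_true, Bool.false_eq_true, if_false, List.length_cons]
          exact ⟨by omega, fun hu => by have := h2 hu; omega⟩
      | false =>
          have h1 := (ih (PySem.Set.union k p)).1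
          simp only [pvAStep, hc, Bool.not_false, if_true, List.length_cons]
          exact ⟨by omega, fun _ => by omega⟩

def exclude_knowns (parties : List (List Int)) (knowns : List Int) : List (List Int) :=
  let r := pvAStep parties knowns
  if h : r.2.2 then exclude_knowns r.1 r.2.1 else r.1
termination_by parties.length
decreasing_by exact (pvAStep_len parties knowns).2 h

-- ===== PORT B =====
-- one round: `for p in parties: if not k.isdisjoint(p): k |= p`
def pvBRound (k : List Int) (ps : List (List Int)) : List Int :=
  ps.foldl (fun k p => if !(PySem.Set.isdisjoint k p) then PySem.Set.union k p else k) k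

-- `for _ in range(len(parties)):` with the `break` when len(k) did not change
def pvBSat : Nat → List Int → List (List Int) → List Int
  | 0, k, _ => k
  | Nat.succ n, k, ps =>
      let k' := pvBRound k ps
      if k'.length = k.length then k' else pvBSat n k' ps

def exclude_knowns_alt (parties : List (List Int)) (knowns : List Int) : List (List Int) :=
  let k := pvBSat parties.length (PySem.Set.ofList knowns) parties
  parties.filter (fun p => PySem.Set.isdisjoint k p)

-- ===== PRECONDITION & SPEC =====
def Spec_exclude_knowns (parties : List (List Int)) (knowns : List Int) (out : List (List Int)) : Prop := out = exclude_knowns_alt parties knowns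
instance (parties : List (List Int)) (knowns : List Int) (out : List (List Int)) : Decidable (Spec_exclude_knowns parties knowns out) := by unfold Spec_exclude_knowns; infer_instance

-- ===== CLAIM (what is proved, stated in full; the proofs are below) =====
def Claim_equal_exclude_knowns : Prop := ∀ (parties : List (List Int)) (knowns : List Int), Dom_exclude_knowns parties knowns → Spec_exclude_knowns parties knowns (exclude_knowns parties knowns)

-- ===== LEMMAS AND PROOFS =====

-- "p meets k", as the boolean both ports branch on
def pvHitsB (p k : List Int) : Bool := p.any (fun x => k.contains x)

theorem pvHits_iff (p k : List Int) : pvHitsB p k = true ↔ ∃ x, x ∈ p ∧ x ∈ k := by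
  simp [pvHitsB, List.any_eq_true]

-- membership inclusion / equivalence of two lists-as-sets
def pvSub (k k' : List Int) : Prop := ∀ x, x ∈ k → x ∈ k'
def pvEqu (k k' : List Int) : Prop := ∀ x, x ∈ k ↔ x ∈ k'

theorem pvEqu_sub {k k' : List Int} (h : pvEqu k k') : pvSub k k' := fun x hx => (h x).mp hx
theorem pvEqu_symm {k k' : List Int} (h : pvEqu k k') : pvEqu k' k := fun x => (h x).symm
theorem pvEqu_trans {a b c : List Int} (h : pvEqu a b) (h' : pvEqu b c) : pvEqu a c :=
  fun x => (h x).trans (h' x)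

theorem pv_mem_union (k p : List Int) (x : Int) :
    x ∈ PySem.Set.union k p ↔ x ∈ k ∨ x ∈ p := PySem.Set.mem_union k p x

theorem pv_isdisjoint_eq (k p : List Int) :
    PySem.Set.isdisjoint k p = !(pvHitsB p k) := by
  cases hb : pvHitsB p k with
  | true =>
      obtain ⟨x, hxp, hxk⟩ := (pvHits_iff p k).mp hb
      cases hd : PySem.Set.isdisjoint k p with
      | false => rfl
      | true => exact absurd hxp ((PySem.Set.isdisjoint_iff k p).mp hd x hxk)
  | false =>
      simp only [Bool.not_false]
      refine (PySem.Set.isdisjoint_iff k p).mpr (fun x hk hp => ?_)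
      exact absurd ((pvHits_iff p k).mpr ⟨x, hp, hk⟩) (by simp [hb])

theorem pv_interEmpty_eq (k p : List Int) :
    (PySem.Set.inter p k).isEmpty = !(pvHitsB p k) := by
  cases hb : pvHitsB p k with
  | true =>
      obtain ⟨x, hxp, hxk⟩ := (pvHits_iff p k).mp hb
      have hx : x ∈ PySem.Set.inter p k := (PySem.Set.mem_inter p k x).mpr ⟨hxp, hxk⟩
      cases he : (PySem.Set.inter p k).isEmpty with
      | false => rfl
      | true => exact absurd hx (by simp [List.isEmpty_iff.mp he])
  | false =>
      simp only [Bool.not_false, List.isEmpty_iff]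
      refine List.eq_nil_iff_forall_not_mem.mpr (fun y hy => ?_)
      have hm := (PySem.Set.mem_inter p k y).mp hy
      exact absurd ((pvHits_iff p k).mpr ⟨y, hm.1, hm.2⟩) (by simp [hb])

-- unfolding A's pass at a head party
theorem pvAStep_cons_hit {p k : List Int} (h : pvHitsB p k = true) (rest : List (List Int)) :
    pvAStep (p :: rest) k =
      ((pvAStep rest (PySem.Set.union k p)).1, (pvAStep rest (PySem.Set.union k p)).2.1, true) := by
  have hc : (PySem.Set.inter p k).isEmpty = false := by rw [pv_interEmpty_eq, h]; rfl
  simp [pvAStep, hc]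

theorem pvAStep_cons_miss {p k : List Int} (h : pvHitsB p k = false) (rest : List (List Int)) :
    pvAStep (p :: rest) k =
      (p :: (pvAStep rest k).1, (pvAStep rest k).2.1, (pvAStep rest k).2.2) := by
  have hc : (PySem.Set.inter p k).isEmpty = true := by rw [pv_interEmpty_eq, h]; rfl
  simp [pvAStep, hc]

-- round unfolding
theorem pvBRound_nil (k : List Int) : pvBRound k [] = k := rfl

theorem pvBRound_cons (k p : List Int) (ps : List (List Int)) :
    pvBRound k (p :: ps) =
      pvBRound (if pvHitsB p k then PySem.Set.union k p else k) ps := by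
  simp only [pvBRound, List.foldl_cons, pv_isdisjoint_eq, Bool.not_not]

-- the round only appends new elements
theorem pvBRound_prefix (ps : List (List Int)) (k : List Int) : k <+: pvBRound k ps := by
  induction ps generalizing k with
  | nil => exact List.prefix_refl k
  | cons p ps ih =>
      rw [pvBRound_cons]
      cases h : pvHitsB p k with
      | true =>
          simp only [if_true]
          refine List.IsPrefix.trans ?_ (ih (PySem.Set.union k p))
          show k <+: PySem.Set.update k p
          rw [PySem.Set.update_eq_append_filter]
          exact List.prefix_append _ _
      | false => simpa using ih k

theorem pvBRound_grow (ps : List (List Int)) (k : List Int) : pvSub k (pvBRound k ps) :=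
  fun _ hx => (pvBRound_prefix ps k).subset hx

-- the round is monotone in the start set (memberships)
theorem pvBRound_mono (ps : List (List Int)) :
    ∀ k k', pvSub k k' → pvSub (pvBRound k ps) (pvBRound k' ps) := by
  induction ps with
  | nil => intro k k' h; simpa [pvBRound_nil] using h
  | cons p ps ih =>
      intro k k' h
      rw [pvBRound_cons, pvBRound_cons]
      cases h1 : pvHitsB p k with
      | true =>
          have h2 : pvHitsB p k' = true := by
            obtain ⟨x, hp, hk⟩ := (pvHits_iff p k).mp h1
            exact (pvHits_iff p k').mpr ⟨x, hp, h x hk⟩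
          simp only [h2, if_true]
          refine ih _ _ (fun x hx => ?_)
          rcases (pv_mem_union k p x).mp hx with hx | hx
          · exact (pv_mem_union k' p x).mpr (Or.inl (h x hx))
          · exact (pv_mem_union k' p x).mpr (Or.inr hx)
      | false =>
          cases h2 : pvHitsB p k' with
          | true =>
              simp only [if_true]
              exact ih _ _ (fun x hx => (pv_mem_union k' p x).mpr (Or.inl (h x hx)))
          | false =>
              simpa using ih k k' h

theorem pvBRound_congr (ps : List (List Int)) {k k' : List Int} (h : pvEqu k k') :
    pvEqu (pvBRound k ps) (pvBRound k' ps) :=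
  fun x => ⟨fun hx => pvBRound_mono ps k k' (pvEqu_sub h) x hx,
            fun hx => pvBRound_mono ps k' k (pvEqu_sub (pvEqu_symm h)) x hx⟩

-- A's knowns component is exactly B's round
theorem pvAStep_knowns (ps : List (List Int)) (k : List Int) :
    (pvAStep ps k).2.1 = pvBRound k ps := by
  induction ps generalizing k with
  | nil => simp [pvAStep, pvBRound_nil]
  | cons p ps ih =>
      rw [pvBRound_cons]
      cases h : pvHitsB p k with
      | true => rw [pvAStep_cons_hit h]; simpa using ih (PySem.Set.union k p)
      | false => rw [pvAStep_cons_miss h]; simpa using ih k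

theorem pvAStep_grow (ps : List (List Int)) (k : List Int) : pvSub k (pvAStep ps k).2.1 := by
  rw [pvAStep_knowns]; exact pvBRound_grow ps k

-- a no-update pass keeps everything and touches nothing
theorem pvAStep_noupd (ps : List (List Int)) (k : List Int)
    (h : (pvAStep ps k).2.2 = false) :
    (pvAStep ps k).1 = ps ∧ (pvAStep ps k).2.1 = k ∧ ∀ p ∈ ps, pvHitsB p k = false := by
  induction ps generalizing k with
  | nil => simp [pvAStep]
  | cons p ps ih =>
      cases hp : pvHitsB p k with
      | true => rw [pvAStep_cons_hit hp] at h; simp at h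
      | false =>
          rw [pvAStep_cons_miss hp] at h ⊢
          obtain ⟨h1, h2, h3⟩ := ih k h
          refine ⟨by rw [h1], h2, fun q hq => ?_⟩
          rcases List.mem_cons.mp hq with rfl | hq
          · exact hp
          · exact h3 q hq

-- dropping the absorbed parties does not change a later round (memberships)
theorem pvAStep_round_transport (ps : List (List Int)) :
    ∀ k0 k, pvSub (pvAStep ps k0).2.1 k →
      pvEqu (pvBRound k ps) (pvBRound k (pvAStep ps k0).1) := by
  induction ps with
  | nil => intro k0 k _; exact fun x => Iff.rfl
  | cons p ps ih =>
      intro k0 k hk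
      cases hp : pvHitsB p k0 with
      | true =>
          -- absorbed: p ⊆ union k0 p ⊆ final knowns ⊆ k, so this round-step is a no-op
          rw [pvAStep_cons_hit hp] at hk ⊢
          have hsubk : pvSub (pvAStep ps (PySem.Set.union k0 p)).2.1 k := fun x hx => hk x hx
          have hpk : ∀ x ∈ p, x ∈ k := fun x hx =>
            hsubk x (pvAStep_grow ps (PySem.Set.union k0 p) x
              ((pv_mem_union k0 p x).mpr (Or.inr hx)))
          have hstep : pvEqu (pvBRound k (p :: ps)) (pvBRound k ps) := by
            rw [pvBRound_cons]
            cases hh : pvHitsB p k with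
            | true =>
                simp only [if_true]
                refine pvBRound_congr ps (fun x => ?_)
                constructor
                · intro hx
                  rcases (pv_mem_union k p x).mp hx with hx | hx
                  · exact hx
                  · exact hpk x hx
                · intro hx; exact (pv_mem_union k p x).mpr (Or.inl hx)
            | false => exact fun x => Iff.rfl
          exact pvEqu_trans hstep (ih (PySem.Set.union k0 p) k hsubk)
      | false =>
          -- kept: both lists start with p, and the round treats p identically
          rw [pvAStep_cons_miss hp] at hk ⊢
          rw [pvBRound_cons, pvBRound_cons]
          have hsub' : pvSub (pvAStep ps k0).2.1 (if pvHitsB p k then PySem.Set.union k p else k) := by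
            intro x hx
            have hxk : x ∈ k := hk x hx
            cases hh : pvHitsB p k with
            | true => simpa using (pv_mem_union k p x).mpr (Or.inl hxk)
            | false => simpa using hxk
          exact ih k0 _ hsub'

-- the unbounded (no-break) saturation, the proof-side reference iteration
def pvSatN : Nat → List Int → List (List Int) → List Int
  | 0, k, _ => k
  | Nat.succ n, k, ps => pvSatN n (pvBRound k ps) ps

theorem pvSatN_grow (j : Nat) (k : List Int) (ps : List (List Int)) :
    pvSub k (pvSatN j k ps) := by
  induction j generalizing k with
  | zero => exact fun x hx => hx
  | succ n ih =>
      intro x hx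
      exact ih (pvBRound k ps) x (pvBRound_grow ps k x hx)

theorem pvSatN_congr (j : Nat) (ps : List (List Int)) :
    ∀ {k k'}, pvEqu k k' → pvEqu (pvSatN j k ps) (pvSatN j k' ps) := by
  induction j with
  | zero => intro k k' h; exact h
  | succ n ih => intro k k' h; exact ih (pvBRound_congr ps h)

theorem pvSatN_stable (j : Nat) (k : List Int) (ps : List (List Int))
    (h : pvBRound k ps = k) : pvSatN j k ps = k := by
  induction j with
  | zero => rfl
  | succ n ih => simp only [pvSatN, h, ih]

-- dropping absorbed parties does not change the iterated saturation either
theorem pvSatN_transport (ps : List (List Int)) (k0 : List Int) (j : Nat) :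
    ∀ k, pvSub (pvAStep ps k0).2.1 k →
      pvEqu (pvSatN j k ps) (pvSatN j k (pvAStep ps k0).1) := by
  induction j with
  | zero => intro k _; exact fun x => Iff.rfl
  | succ n ih =>
      intro k hk
      simp only [pvSatN]
      have h1 : pvEqu (pvSatN n (pvBRound k ps) ps) (pvSatN n (pvBRound k (pvAStep ps k0).1) ps) :=
        pvSatN_congr n ps (pvAStep_round_transport ps k0 k hk)
      have hk' : pvSub (pvAStep ps k0).2.1 (pvBRound k (pvAStep ps k0).1) := fun x hx =>
        pvBRound_grow (pvAStep ps k0).1 k x (hk x hx)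
      exact pvEqu_trans h1 (ih (pvBRound k (pvAStep ps k0).1) hk')

-- filtering by any superset of the final knowns commutes with A's pass
theorem pvAStep_filter (ps : List (List Int)) :
    ∀ k K, pvSub (pvAStep ps k).2.1 K →
      ps.filter (fun p => PySem.Set.isdisjoint K p)
        = (pvAStep ps k).1.filter (fun p => PySem.Set.isdisjoint K p) := by
  induction ps with
  | nil => intro k K _; simp [pvAStep]
  | cons p ps ih =>
      intro k K hK
      cases hp : pvHitsB p k with
      | true =>
          rw [pvAStep_cons_hit hp] at hK ⊢
          have hK' : pvSub (pvAStep ps (PySem.Set.union k p)).2.1 K := fun x hx => hK x hx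
          obtain ⟨x, hxp, hxk⟩ := (pvHits_iff p k).mp hp
          have hxK : x ∈ K :=
            hK' x (pvAStep_grow ps (PySem.Set.union k p) x ((pv_mem_union k p x).mpr (Or.inl hxk)))
          have hthit : pvHitsB p K = true := (pvHits_iff p K).mpr ⟨x, hxp, hxK⟩
          have hcond : PySem.Set.isdisjoint K p = false := by
            rw [pv_isdisjoint_eq, hthit]; rfl
          rw [List.filter_cons]
          simp only [hcond, Bool.false_eq_true, if_false]
          exact ih (PySem.Set.union k p) K hK'
      | false =>
          rw [pvAStep_cons_miss hp] at hK ⊢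
          rw [List.filter_cons, List.filter_cons]
          rw [ih k K (fun x hx => hK x hx)]

theorem pv_filter_congr (ps : List (List Int)) {K K' : List Int} (h : pvEqu K K') :
    ps.filter (fun p => PySem.Set.isdisjoint K p)
      = ps.filter (fun p => PySem.Set.isdisjoint K' p) := by
  refine List.filter_congr (fun p _ => ?_)
  rw [pv_isdisjoint_eq, pv_isdisjoint_eq]
  cases hp : pvHitsB p K with
  | true =>
      obtain ⟨x, h1, h2⟩ := (pvHits_iff p K).mp hp
      rw [(pvHits_iff p K').mpr ⟨x, h1, (h x).mp h2⟩]
  | false =>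
      have : pvHitsB p K' = false := by
        cases hq : pvHitsB p K' with
        | false => rfl
        | true =>
            obtain ⟨x, h1, h2⟩ := (pvHits_iff p K').mp hq
            exact absurd ((pvHits_iff p K).mpr ⟨x, h1, (h x).mpr h2⟩) (by simp [hp])
      rw [this]

-- MAIN: A equals "filter by any sufficiently iterated saturation"
theorem pvMain (n : Nat) : ∀ ps : List (List Int), ps.length ≤ n → ∀ (k : List Int) (j : Nat),
    ps.length ≤ j →
    exclude_knowns ps k = ps.filter (fun p => PySem.Set.isdisjoint (pvSatN j k ps) p) := by
  induction n with
  | zero =>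
      intro ps hps k j _
      cases ps with
      | nil => rw [exclude_knowns]; simp [pvAStep]
      | cons a l => simp at hps
  | succ n ih =>
      intro ps hps k j hj
      by_cases hu : (pvAStep ps k).2.2 = true
      · -- updating pass: recurse
        rcases j with _ | j'
        · cases ps with
          | nil => simp [pvAStep] at hu
          | cons a l => simp at hj
        have hlt : (pvAStep ps k).1.length < ps.length := (pvAStep_len ps k).2 hu
        have hrec : exclude_knowns ps k = exclude_knowns (pvAStep ps k).1 (pvAStep ps k).2.1 := by
          rw [exclude_knowns]; simp [hu]
        have hlen' : (pvAStep ps k).1.length ≤ n := by omega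
        have hj' : (pvAStep ps k).1.length ≤ j' := by omega
        have hih := ih (pvAStep ps k).1 hlen' (pvAStep ps k).2.1 j' hj'
        have hsat1 : pvSatN (j' + 1) k ps = pvSatN j' (pvAStep ps k).2.1 ps := by
          simp only [pvSatN, pvAStep_knowns]
        have htrans : pvEqu (pvSatN j' (pvAStep ps k).2.1 ps)
            (pvSatN j' (pvAStep ps k).2.1 (pvAStep ps k).1) :=
          pvSatN_transport ps k j' (pvAStep ps k).2.1 (fun x hx => hx)
        have hsubK : pvSub (pvAStep ps k).2.1 (pvSatN j' (pvAStep ps k).2.1 ps) :=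
          pvSatN_grow j' (pvAStep ps k).2.1 ps
        calc exclude_knowns ps k
            = exclude_knowns (pvAStep ps k).1 (pvAStep ps k).2.1 := hrec
          _ = (pvAStep ps k).1.filter
                (fun p => PySem.Set.isdisjoint (pvSatN j' (pvAStep ps k).2.1 (pvAStep ps k).1) p) := hih
          _ = (pvAStep ps k).1.filter
                (fun p => PySem.Set.isdisjoint (pvSatN j' (pvAStep ps k).2.1 ps) p) :=
              (pv_filter_congr _ htrans).symm
          _ = ps.filter (fun p => PySem.Set.isdisjoint (pvSatN j' (pvAStep ps k).2.1 ps) p) :=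
              (pvAStep_filter ps k _ hsubK).symm
          _ = ps.filter (fun p => PySem.Set.isdisjoint (pvSatN (j' + 1) k ps) p) := by
              rw [hsat1]
      · -- stable pass: nothing moves, everything is kept
        have hu' : (pvAStep ps k).2.2 = false := by simpa using hu
        obtain ⟨h1, h2, h3⟩ := pvAStep_noupd ps k hu'
        have hA : exclude_knowns ps k = ps := by rw [exclude_knowns]; simp [hu', h1]
        have hround : pvBRound k ps = k := by rw [← pvAStep_knowns, h2]
        have hsat : pvSatN j k ps = k := by
          rcases j with _ | j'
          · rfl
          · simp only [pvSatN, hround]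
            exact pvSatN_stable j' k ps hround
        rw [hA, hsat]
        symm
        refine List.filter_eq_self.mpr (fun p hp => ?_)
        rw [pv_isdisjoint_eq, h3 p hp]
        rfl

-- B's bounded-with-break iteration equals the unbounded one
theorem pvBSat_eq_satN (ps : List (List Int)) : ∀ (n : Nat) (k : List Int),
    pvBSat n k ps = pvSatN n k ps := by
  intro n
  induction n with
  | zero => intro k; rfl
  | succ m ih =>
      intro k
      simp only [pvBSat, pvSatN]
      by_cases h : (pvBRound k ps).length = k.length
      · have heq : pvBRound k ps = k :=
          ((pvBRound_prefix ps k).eq_of_length h.symm).symm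
        simp [heq, pvSatN_stable m k ps heq]
      · simp [h, ih (pvBRound k ps)]

-- ===== VERDICT (by name: the statement is the Claim_ definition above) =====
theorem exclude_knowns_spec : Claim_equal_exclude_knowns := by
  intro parties knowns _
  show exclude_knowns parties knowns = exclude_knowns_alt parties knowns
  have hmain := pvMain parties.length parties (Nat.le_refl _) knowns parties.length (Nat.le_refl _)
  rw [hmain]
  show _ = parties.filter
      (fun p => PySem.Set.isdisjoint (pvBSat parties.length (PySem.Set.ofList knowns) parties) p)
  rw [pvBSat_eq_satN]
  refine pv_filter_congr parties (pvSatN_congr parties.length parties (fun x => ?_))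
  exact (PySem.Set.mem_ofList knowns x).symm
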